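-- pv_equiv track=rewrite | github.com/AwesomeCronk/tictactoe | utils.py | unhashBoard
-- ===== SOURCE A (Python) =====
-- def unhashBoard(hash: int):
--     board = []
--     symbols = [' ', 'X', 'O']
--     remaining = hash
--     for i in range(9):
--         last = remaining % 3
--         board.append(symbols[last])
--         remaining = remaining // 3
--     return board
-- ===== SOURCE B (Python) =====
-- _SYMBOLS = [' ', 'X', 'O']
-- # 27-entry table: entry d is the 3-cell chunk for the base-27 digit d
-- _TRIPLES = [[_SYMBOLS[d % 3], _SYMBOLS[d // 3 % 3], _SYMBOLS[d // 9]] for d in range(27)]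
--
-- def unhashBoard(hash: int):
--     r = hash % 19683          # board depends only on hash mod 3**9; r is non-negative
--     return _TRIPLES[r % 27] + _TRIPLES[r // 27 % 27] + _TRIPLES[r // 729]
-- ===== Notes on version B (the rewrite author's own statement) =====
-- stated objective: alternative
-- what changed: Instead of nine sequential divide-and-remainder steps appending one cell each, B reduces the hash modulo 3**9 once and decodes it as three base-27 chunks through a precomputed 27-entry table of symbol triples (3 lookups + list concatenation).
import Mathlib
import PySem

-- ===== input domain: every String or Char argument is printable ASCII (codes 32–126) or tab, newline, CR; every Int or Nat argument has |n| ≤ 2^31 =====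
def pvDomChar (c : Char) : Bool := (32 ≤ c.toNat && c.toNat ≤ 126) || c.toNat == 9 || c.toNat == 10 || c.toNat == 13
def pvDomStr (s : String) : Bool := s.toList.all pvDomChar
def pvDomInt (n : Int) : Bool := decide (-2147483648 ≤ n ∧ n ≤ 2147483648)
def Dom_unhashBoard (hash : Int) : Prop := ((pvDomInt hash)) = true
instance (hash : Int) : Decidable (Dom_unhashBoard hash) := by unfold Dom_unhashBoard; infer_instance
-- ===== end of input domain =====

-- B replaces A's nine-step divide-and-append loop by one reduction mod 3^9 followed by
-- three lookups in a precomputed 27-entry table of symbol triples; objective: alternative.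

-- ===== PORT A =====
-- loop over range(9) threading (board, remaining)
def unhashBoard (hash : Int) : List String :=
  let symbols : List String := [" ", "X", "O"]
  let st := (PySem.List.pyRange 0 9 1).foldl
    (fun (st : List String × Int) _ =>
      let last := PySem.Int.mod st.2 3
      (st.1 ++ [PySem.List.pyGetD symbols last ""], PySem.Int.floordiv st.2 3))
    ([], hash)
  st.1

-- ===== PORT B =====
-- module-level: _SYMBOLS and the 27-entry chunk table _TRIPLES
def pvSymbols : List String := [" ", "X", "O"]

def pvTriples : List (List String) :=
  (PySem.List.pyRange 0 27 1).map (fun d =>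
    [PySem.List.pyGetD pvSymbols (PySem.Int.mod d 3) "",
     PySem.List.pyGetD pvSymbols (PySem.Int.mod (PySem.Int.floordiv d 3) 3) "",
     PySem.List.pyGetD pvSymbols (PySem.Int.floordiv d 9) ""])

-- r = hash % 19683; _TRIPLES[r % 27] + _TRIPLES[r // 27 % 27] + _TRIPLES[r // 729]
def unhashBoard_alt (hash : Int) : List String :=
  let r := PySem.Int.mod hash 19683
  PySem.List.pyGetD pvTriples (PySem.Int.mod r 27) [] ++
  PySem.List.pyGetD pvTriples (PySem.Int.mod (PySem.Int.floordiv r 27) 27) [] ++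
  PySem.List.pyGetD pvTriples (PySem.Int.floordiv r 729) []

-- ===== PRECONDITION & SPEC =====
def Spec_unhashBoard (hash : Int) (out : List String) : Prop := out = unhashBoard_alt hash
instance (hash : Int) (out : List String) : Decidable (Spec_unhashBoard hash out) := by unfold Spec_unhashBoard; infer_instance

-- ===== CLAIM (what is proved, stated in full; the proofs are below) =====
def Claim_equal_unhashBoard : Prop := ∀ (hash : Int), Dom_unhashBoard hash → Spec_unhashBoard hash (unhashBoard hash)

-- ===== LEMMAS AND PROOFS =====

-- a table lookup at 0 ≤ d < 27 yields the triple of base-3 digits of d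
theorem pvTriples_lookup (d : Int) (h0 : 0 ≤ d) (h27 : d < 27) :
    PySem.List.pyGetD pvTriples d [] =
      [PySem.List.pyGetD pvSymbols (PySem.Int.mod d 3) "",
       PySem.List.pyGetD pvSymbols (PySem.Int.mod (PySem.Int.floordiv d 3) 3) "",
       PySem.List.pyGetD pvSymbols (PySem.Int.floordiv d 9) ""] := by
  unfold pvTriples
  exact PySem.List.pyGetD_map_pyRange_of_nonneg _ 27 d [] h0 h27

theorem unhashBoard_eq_alt (hash : Int) : unhashBoard hash = unhashBoard_alt hash := by
  unfold unhashBoard unhashBoard_alt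
  have hr9 : PySem.List.pyRange 0 9 1 = [0, 1, 2, 3, 4, 5, 6, 7, 8] := by decide
  rw [hr9]
  simp only [List.foldl, List.nil_append, List.append_assoc, List.cons_append]
  set r := PySem.Int.mod hash 19683 with hrdef
  have hr0 : 0 ≤ r := PySem.Int.mod_nonneg hash (by norm_num)
  have hr1 : r < 19683 := PySem.Int.mod_lt hash (by norm_num)
  have hb0 : (0:Int) ≤ PySem.Int.mod r 27 := PySem.Int.mod_nonneg r (by norm_num)
  have hb0' : PySem.Int.mod r 27 < 27 := PySem.Int.mod_lt r (by norm_num)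
  have hb1 : (0:Int) ≤ PySem.Int.mod (PySem.Int.floordiv r 27) 27 :=
    PySem.Int.mod_nonneg _ (by norm_num)
  have hb1' : PySem.Int.mod (PySem.Int.floordiv r 27) 27 < 27 :=
    PySem.Int.mod_lt _ (by norm_num)
  have hb2 : (0:Int) ≤ PySem.Int.floordiv r 729 := by
    rw [PySem.Int.floordiv_eq_ediv_of_pos (by norm_num)]; omega
  have hb2' : PySem.Int.floordiv r 729 < 27 := by
    rw [PySem.Int.floordiv_eq_ediv_of_pos (by norm_num)]; omega
  rw [pvTriples_lookup _ hb0 hb0', pvTriples_lookup _ hb1 hb1', pvTriples_lookup _ hb2 hb2']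
  simp only [List.cons_append, List.nil_append, pvSymbols, List.cons.injEq, and_true]
  rw [hrdef]
  refine ⟨?_, ?_, ?_, ?_, ?_, ?_, ?_, ?_, ?_⟩ <;>
  · congr 1
    simp only [PySem.Int.mod_eq_emod_of_pos, PySem.Int.floordiv_eq_ediv_of_pos,
      (by norm_num : (0:Int) < 3), (by norm_num : (0:Int) < 9),
      (by norm_num : (0:Int) < 27), (by norm_num : (0:Int) < 729),
      (by norm_num : (0:Int) < 19683)]
    omega

-- ===== VERDICT (by name: the statement is the Claim_ definition above) =====
theorem unhashBoard_spec : Claim_equal_unhashBoard := by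
  intro hash _
  exact unhashBoard_eq_alt hash
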